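-- pv_equiv track=rewrite | github.com/TZH-lab/Cryptography | 2024010017陶正洪/Lab1/caesar.py | find_meaningful_result
-- ===== SOURCE A (Python) =====
-- def find_meaningful_result(results):
--     """
--     找出有意义的明文结果
--     通过常见英文单词和词组来判断
--     """
--     # 常见的英文单词和词组
--     common_words = ['THE', 'AND', 'FOR', 'YOU', 'ARE', 'THIS', 'THAT',
--                    'HAVE', 'WILL', 'YOUR', 'FROM', 'WITH', 'KNOW',
--                    'PLEASE', 'STUDENT', 'HELLO', 'WORLD', 'LAB',
--                    'EXPERIMENT', 'CAESAR', 'CIPHER']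
--
--     meaningful_results = []
--     for shift, text in results:
--         # 检查是否包含常见英文单词
--         words = text.split()
--         match_count = 0
--         for word in words:
--             if word in common_words:
--                 match_count += 1
--
--         # 如果匹配到至少一个常见单词，认为是可能的结果
--         if match_count > 0:
--             meaningful_results.append((shift, text, match_count))
--
--     # 按匹配单词数量排序
--     meaningful_results.sort(key=lambda x: x[2], reverse=True)
--     return meaningful_results
-- ===== SOURCE B (Python) =====
-- COMMON_WORDS = ('THE AND FOR YOU ARE THIS THAT HAVE WILL YOUR FROM WITH '
--                 'KNOW PLEASE STUDENT HELLO WORLD LAB EXPERIMENT CAESAR CIPHER').split()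
--
--
-- def _score(text):
--     # frequency table of the text's words, built once; then the fixed
--     # 21-word list drives the lookups (no membership scan per text word)
--     freq = {}
--     for w in text.split():
--         freq[w] = freq.get(w, 0) + 1
--     return sum(freq.get(w, 0) for w in COMMON_WORDS)
--
--
-- def find_meaningful_result(results):
--     # staged pipeline: score everything, filter the positives, then sort
--     scored = [(shift, text, _score(text)) for shift, text in results]
--     kept = [r for r in scored if r[2] > 0]
--     return sorted(kept, key=lambda r: r[2], reverse=True)
-- ===== Notes on version B (the rewrite author's own statement) =====
-- stated objective: alternative
-- what changed: B is a staged map/filter/sort pipeline whose per-text score builds a word-frequency dict once and sums lookups of the fixed 21 common words, replacing A's single accumulator loop with a per-word membership scan of the common-word list.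
import Mathlib
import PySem

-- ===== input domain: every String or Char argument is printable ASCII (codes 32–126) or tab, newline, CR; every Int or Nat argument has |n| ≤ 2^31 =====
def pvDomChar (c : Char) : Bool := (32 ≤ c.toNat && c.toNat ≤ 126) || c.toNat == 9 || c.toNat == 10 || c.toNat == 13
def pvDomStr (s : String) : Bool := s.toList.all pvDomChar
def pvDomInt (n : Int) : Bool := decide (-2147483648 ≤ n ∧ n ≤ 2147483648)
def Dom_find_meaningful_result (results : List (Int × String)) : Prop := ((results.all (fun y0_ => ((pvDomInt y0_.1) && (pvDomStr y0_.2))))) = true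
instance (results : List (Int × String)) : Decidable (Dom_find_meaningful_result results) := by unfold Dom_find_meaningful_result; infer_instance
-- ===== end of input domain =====

-- B is a staged map/filter/sort pipeline whose per-text score sums frequency-dict lookups of the
-- fixed 21 common words, instead of A's one accumulator loop scanning the word list per text word.

set_option maxRecDepth 8192

-- ===== PORT A =====
def commonWords : List String :=
  ["THE", "AND", "FOR", "YOU", "ARE", "THIS", "THAT",
   "HAVE", "WILL", "YOUR", "FROM", "WITH", "KNOW",
   "PLEASE", "STUDENT", "HELLO", "WORLD", "LAB",
   "EXPERIMENT", "CAESAR", "CIPHER"]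

def find_meaningful_result (results : List (Int × String)) : List (Int × String × Int) :=
  let meaningful := results.foldl (fun acc st =>
    let words := PySem.Str.split₀ st.2
    let match_count := words.foldl (fun m word =>
      if word ∈ commonWords then m + 1 else m) (0 : Int)
    if match_count > 0 then acc ++ [(st.1, st.2, match_count)] else acc) []
  PySem.List.sorted meaningful (fun x => x.2.2) true

-- ===== PORT B =====
def bCommonWords : List String :=
  PySem.Str.split₀ ("THE AND FOR YOU ARE THIS THAT HAVE WILL YOUR FROM WITH " ++
                    "KNOW PLEASE STUDENT HELLO WORLD LAB EXPERIMENT CAESAR CIPHER")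

-- port of Source B's _score helper
def bScore (text : String) : Int :=
  let freq := (PySem.Str.split₀ text).foldl
    (fun d w => d.insert w (d.getD w 0 + 1)) (PySem.Dict.empty : PySem.Dict String Int)
  (bCommonWords.map (fun w => freq.getD w 0)).sum

def find_meaningful_result_alt (results : List (Int × String)) : List (Int × String × Int) :=
  let scored := results.map (fun st => (st.1, st.2, bScore st.2))
  let kept := scored.filter (fun r => r.2.2 > 0)
  PySem.List.sorted kept (fun r => r.2.2) true

-- ===== PRECONDITION & SPEC =====
def Spec_find_meaningful_result (results : List (Int × String)) (out : List (Int × String × Int)) : Prop := out = find_meaningful_result_alt results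
instance (results : List (Int × String)) (out : List (Int × String × Int)) : Decidable (Spec_find_meaningful_result results out) := by unfold Spec_find_meaningful_result; infer_instance

-- ===== CLAIM (what is proved, stated in full; the proofs are below) =====
def Claim_equal_find_meaningful_result : Prop := ∀ (results : List (Int × String)), Dom_find_meaningful_result results → Spec_find_meaningful_result results (find_meaningful_result results)

-- ===== LEMMAS AND PROOFS =====

-- splitting the membership count at the head of a duplicate-free word list
lemma countP_mem_cons (c : String) (cs : List String) (hc : c ∉ cs) (ws : List String) :
    ws.countP (fun x => decide (x ∈ c :: cs))
      = ws.count c + ws.countP (fun x => decide (x ∈ cs)) := by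
  induction ws with
  | nil => simp
  | cons y ys ihy =>
    simp only [List.countP_cons, List.count_cons, ihy]
    by_cases hy : y = c
    · subst hy; simp [hc]; omega
    · by_cases hy2 : y ∈ cs <;> simp [hy, hy2] <;> omega


-- summing the counts of the (distinct) common words = counting the words that are common
lemma sum_count_eq_countP (cw : List String) (hcw : cw.Nodup) (ws : List String) :
    (cw.map (fun w => (ws.count w : Int))).sum = (ws.countP (fun x => x ∈ cw) : Int) := by
  induction cw with
  | nil => simp
  | cons c cs ih =>
    simp only [List.nodup_cons] at hcw
    simp only [List.map_cons, List.sum_cons, ih hcw.2, countP_mem_cons c cs hcw.1 ws]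
    push_cast
    ring

-- A's per-text running count equals B's frequency-dict score
lemma score_eq (t : String) :
    (PySem.Str.split₀ t).foldl (fun m word => if word ∈ commonWords then m + 1 else m) (0 : Int)
      = bScore t := by
  unfold bScore
  have hfreq : (PySem.Str.split₀ t).foldl (fun d w => d.insert w (d.getD w 0 + 1))
      (PySem.Dict.empty : PySem.Dict String Int) = PySem.Dict.counter (PySem.Str.split₀ t) := by
    rw [PySem.Dict.counter_eq_foldl]; rfl
  have hwB : bCommonWords = commonWords := by decide
  rw [hfreq, hwB]
  have h1 : ∀ w, (PySem.Dict.counter (PySem.Str.split₀ t)).getD w 0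
      = ((PySem.Str.split₀ t).count w : Int) := fun w => PySem.Dict.getD_counter _ _
  simp only [h1]
  rw [sum_count_eq_countP commonWords (by decide)]
  have h2 := PySem.List.foldl_count_if (fun w : String => decide (w ∈ commonWords)) (PySem.Str.split₀ t) 0
  simp only [decide_eq_true_eq] at h2
  rw [h2]
  simp

-- ===== VERDICT (by name: the statement is the Claim_ definition above) =====
theorem find_meaningful_result_spec : Claim_equal_find_meaningful_result := by
  intro results _
  unfold Spec_find_meaningful_result find_meaningful_result find_meaningful_result_alt
  -- put A's loop body in the 'if p then append f' shape
  have hA : (fun (acc : List (Int × String × Int)) (st : Int × String) =>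
      let words := PySem.Str.split₀ st.2
      let match_count := words.foldl (fun m word =>
        if word ∈ commonWords then m + 1 else m) (0 : Int)
      if match_count > 0 then acc ++ [(st.1, st.2, match_count)] else acc)
    = (fun acc st =>
      if (decide (bScore st.2 > 0)) = true then acc ++ [(st.1, st.2, bScore st.2)] else acc) := by
    funext acc st
    simp only [score_eq st.2, decide_eq_true_eq]
  rw [hA, PySem.List.foldl_append_if (fun st : Int × String => decide (bScore st.2 > 0))
        (fun st : Int × String => (st.1, st.2, bScore st.2))]
  -- B's filter-after-map is A's map-after-filter
  simp only [List.filter_map, List.nil_append]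
  rfl
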